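-- pv_equiv track=rewrite | github.com/shok1i/ConfigurationControl | Practice_5/main.py | formatingRequires
-- ===== SOURCE A (Python) =====
-- def formatingRequires(requiresDist):
--     if not (requiresDist == None):
--         for i in range(0, len(requiresDist)):
--             requiresDist[i] = \
--             str(requiresDist[i]).split('>', 1)[0].split('<', 1)[0].split("extra", 1)[0].split('[', 1)[0].split(';', 1)[
--                 0].split('=', 1)[0].split('(', 1)[0].split(' ', 1)[0].split('.', 1)[0]
--             requiresDist[i] = str(requiresDist[i]).replace('-', '_')
--     return requiresDist
-- ===== SOURCE B (Python) =====
-- def formatingRequires(requiresDist):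
--     # One left-to-right pass per element: stop at the first delimiter (or at
--     # the first occurrence of "extra") and translate '-' to '_' on the fly,
--     # instead of A's nine successive split-and-keep-prefix passes.
--     if requiresDist is None:
--         return None
--     delims = set('><[;=( .')
--     for i in range(len(requiresDist)):
--         s = str(requiresDist[i])
--         out = []
--         j = 0
--         while j < len(s):
--             c = s[j]
--             if c in delims or s.startswith('extra', j):
--                 break
--             out.append('_' if c == '-' else c)
--             j += 1
--         requiresDist[i] = ''.join(out)
--     return requiresDist
-- ===== Notes on version B (the rewrite author's own statement) =====
-- stated objective: alternative
-- what changed: A runs nine separate split('x',1)[0] prefix passes plus a replace pass over each string; B makes a single left-to-right scan per string that stops at the earliest delimiter (or 'extra' occurrence) and maps '-' to '_' in the same pass; same asymptotic cost, and A's C-level split is faster in CPython than B's explicit per-character loop.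
import Mathlib
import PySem

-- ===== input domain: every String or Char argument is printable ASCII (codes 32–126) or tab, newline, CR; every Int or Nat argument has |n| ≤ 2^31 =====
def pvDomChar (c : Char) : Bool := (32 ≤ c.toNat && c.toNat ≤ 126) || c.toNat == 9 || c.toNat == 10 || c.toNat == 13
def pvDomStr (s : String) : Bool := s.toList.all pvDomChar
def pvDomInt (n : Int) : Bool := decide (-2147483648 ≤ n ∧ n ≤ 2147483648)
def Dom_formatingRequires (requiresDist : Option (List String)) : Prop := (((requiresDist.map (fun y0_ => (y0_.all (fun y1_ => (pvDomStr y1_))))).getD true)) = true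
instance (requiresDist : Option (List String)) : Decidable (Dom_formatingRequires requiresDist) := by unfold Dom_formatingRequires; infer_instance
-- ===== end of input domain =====

-- B replaces A's nine split('x',1)[0] prefix passes + replace pass per string by a single
-- left-to-right scan; the equivalence below is about the RETURN value (Python A and B both
-- mutate the passed list in place and return the same list object).

-- ===== PORT A =====
-- s.split(sep, 1)[0]  (sep is a nonempty literal, so the split succeeds and the list is nonempty)
def pvSplitFirst (cs sep : List Char) : List Char := (PySem.Chars.splitOnMax cs sep 1).getD 0 []

def formatingRequires (requiresDist : Option (List String)) : Option (List String) :=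
  match requiresDist with
  | none => none
  | some l => some (l.map (fun s =>
      String.ofList (PySem.Chars.replace
        (pvSplitFirst (pvSplitFirst (pvSplitFirst (pvSplitFirst (pvSplitFirst (pvSplitFirst
          (pvSplitFirst (pvSplitFirst (pvSplitFirst s.toList ['>']) ['<'])
            ['e', 'x', 't', 'r', 'a']) ['[']) [';']) ['=']) ['(']) [' ']) ['.'])
        ['-'] ['_'])))

-- ===== PORT B =====
def pvDelims : List Char := ['>', '<', '[', ';', '=', '(', ' ', '.']

-- the while loop of Source B: index j ↔ the remaining suffix of the string
def pvScan : List Char → List Char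
  | [] => []
  | c :: rest =>
    if pvDelims.contains c || List.isPrefixOf ['e', 'x', 't', 'r', 'a'] (c :: rest) then []
    else (if c = '-' then '_' else c) :: pvScan rest

def formatingRequires_alt (requiresDist : Option (List String)) : Option (List String) :=
  match requiresDist with
  | none => none
  | some l => some (l.map (fun s => String.ofList (pvScan s.toList)))

-- ===== PRECONDITION & SPEC =====
def Spec_formatingRequires (requiresDist : Option (List String)) (out : Option (List String)) : Prop := out = formatingRequires_alt requiresDist
instance (requiresDist : Option (List String)) (out : Option (List String)) : Decidable (Spec_formatingRequires requiresDist out) := by unfold Spec_formatingRequires; infer_instance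

-- ===== CLAIM (what is proved, stated in full; the proofs are below) =====
def Claim_equal_formatingRequires : Prop := ∀ (requiresDist : Option (List String)), Dom_formatingRequires requiresDist → Spec_formatingRequires requiresDist (formatingRequires requiresDist)

-- ===== LEMMAS AND PROOFS =====

-- the prefix of cs before the first occurrence of sep (all of cs if none)
def pvCutSub (sep : List Char) : List Char → List Char
  | [] => []
  | c :: rest => if sep.isPrefixOf (c :: rest) then [] else c :: pvCutSub sep rest

lemma pvGo_m0_head (sep : List Char) (fuel : Nat) (l cur a : List Char) :
    (PySem.Chars.splitOnMax.go sep fuel 0 l cur [a])[0]?.getD [] = a := by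
  cases fuel <;> cases l <;> rw [PySem.Chars.splitOnMax.go.eq_def] <;> simp

lemma pvGo_one_head (sep : List Char) :
    ∀ (fuel : Nat) (l cur : List Char), l.length < fuel →
      (PySem.Chars.splitOnMax.go sep fuel 1 l cur [])[0]?.getD [] = cur.reverse ++ pvCutSub sep l := by
  intro fuel
  induction fuel with
  | zero => intro l cur h; omega
  | succ n ih =>
    intro l cur h
    cases l with
    | nil => rw [PySem.Chars.splitOnMax.go.eq_def]; simp [pvCutSub]
    | cons c rest =>
      rw [PySem.Chars.splitOnMax.go.eq_def]
      simp only [pvCutSub]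
      by_cases hp : sep.isPrefixOf (c :: rest) = true
      · simp [hp, pvGo_m0_head]
      · simp only [hp, Bool.false_eq_true, ite_false]
        rw [if_neg (by norm_num), ih rest (c :: cur) (by simp at h ⊢; omega)]
        simp

lemma pvSplitFirst_eq_cutSub (cs sep : List Char) : pvSplitFirst cs sep = pvCutSub sep cs := by
  unfold pvSplitFirst PySem.Chars.splitOnMax
  norm_num
  exact pvGo_one_head sep (cs.length + 1) cs [] (by omega)

lemma pvCutSub_single (c : Char) (l : List Char) :
    pvCutSub [c] l = l.takeWhile (fun a => !(a == c)) := by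
  induction l with
  | nil => simp [pvCutSub]
  | cons a rest ih =>
    simp only [pvCutSub, List.takeWhile_cons, List.isPrefixOf, Bool.and_true]
    by_cases h : a = c
    · subst h; simp
    · simp [h, Ne.symm h, ih]

lemma pvReplace_go_single (fuel : Nat) :
    ∀ (l acc : List Char), l.length ≤ fuel →
      PySem.Chars.replace.go ['-'] ['_'] fuel l acc =
        acc.reverse ++ l.map (fun c => if c = '-' then '_' else c) := by
  induction fuel with
  | zero =>
    intro l acc h
    cases l with
    | nil => rw [PySem.Chars.replace.go.eq_def]; simp
    | cons c t => simp at h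
  | succ n ih =>
    intro l acc h
    cases l with
    | nil => rw [PySem.Chars.replace.go.eq_def]; simp
    | cons c t =>
      rw [PySem.Chars.replace.go.eq_def]
      have hlen : t.length ≤ n := by simp only [List.length_cons] at h; omega
      dsimp only
      have hpre : (['-'].isPrefixOf (c :: t)) = (c == '-') := by
        simp [List.isPrefixOf, eq_comm]
      rw [hpre]
      by_cases hc : c = '-'
      · subst hc
        rw [if_pos (by simp)]
        rw [ih _ _ (by simpa using hlen)]
        simp
      · rw [if_neg (by simp [hc])]
        rw [ih t _ hlen]
        rw [List.map_cons, if_neg hc, List.reverse_cons, List.append_assoc, List.singleton_append]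

lemma pvReplace_single (l : List Char) :
    PySem.Chars.replace l ['-'] ['_'] = l.map (fun c => if c = '-' then '_' else c) := by
  unfold PySem.Chars.replace
  simp only [List.isEmpty_cons, Bool.false_eq_true, if_false]
  exact pvReplace_go_single l.length l [] (by simp)

-- extra-occurrence at the head is unaffected by takeWhile with a predicate true on extra's letters
lemma pvExtra_takeWhile (p : Char → Bool)
    (he : p 'e' = true) (hx : p 'x' = true) (ht : p 't' = true) (hr : p 'r' = true)
    (ha : p 'a' = true) (l : List Char) :
    List.isPrefixOf ['e', 'x', 't', 'r', 'a'] (l.takeWhile p) =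
      List.isPrefixOf ['e', 'x', 't', 'r', 'a'] l := by
  by_cases h : List.isPrefixOf ['e', 'x', 't', 'r', 'a'] l = true
  · rw [h]
    rw [List.isPrefixOf_iff_prefix] at h ⊢
    obtain ⟨t', rfl⟩ := h
    simp only [List.takeWhile, he, hx, ht, hr, ha, List.cons_append, List.nil_append]
    exact ⟨t'.takeWhile p, rfl⟩
  · simp only [Bool.not_eq_true] at h
    rw [h]
    rw [Bool.eq_false_iff]
    intro hcontra
    rw [List.isPrefixOf_iff_prefix] at hcontra
    have : List.isPrefixOf ['e', 'x', 't', 'r', 'a'] l = true := by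
      rw [List.isPrefixOf_iff_prefix]
      exact hcontra.trans (List.takeWhile_prefix p)
    simp [this] at h

-- the two inner single-char cuts collapsed into one takeWhile
def pvP (a : Char) : Bool := !(a == '>') && !(a == '<')
-- the six outer single-char cuts collapsed into one takeWhile
def pvQ (a : Char) : Bool := !(a == '[') && !(a == ';') && !(a == '=') && !(a == '(') && !(a == ' ') && !(a == '.')

lemma pvInner_collapse (cs : List Char) :
    pvCutSub ['<'] (pvCutSub ['>'] cs) = cs.takeWhile pvP := by
  rw [pvCutSub_single, pvCutSub_single, List.takeWhile_takeWhile]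
  have hpred : (fun a => decide ((!(a == '<')) = true ∧ (!(a == '>')) = true)) = pvP := by
    funext a
    by_cases h1 : a = '<' <;> by_cases h2 : a = '>' <;> simp [pvP, h1, h2]
  rw [hpred]

lemma pvOuter_collapse (cs : List Char) :
    pvCutSub ['.'] (pvCutSub [' '] (pvCutSub ['('] (pvCutSub ['='] (pvCutSub [';'] (pvCutSub ['['] cs))))) =
      cs.takeWhile pvQ := by
  simp only [pvCutSub_single, List.takeWhile_takeWhile]
  congr 1
  funext a
  simp only [pvQ]
  by_cases h1 : a = '[' <;> by_cases h2 : a = ';' <;> by_cases h3 : a = '=' <;>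
    by_cases h4 : a = '(' <;> by_cases h5 : a = ' ' <;> by_cases h6 : a = '.' <;>
    simp [h1, h2, h3, h4, h5, h6]

lemma pvMain (cs : List Char) :
    (List.takeWhile pvQ (pvCutSub ['e', 'x', 't', 'r', 'a'] (List.takeWhile pvP cs))).map
      (fun c => if c = '-' then '_' else c) = pvScan cs := by
  induction cs with
  | nil => simp [pvCutSub, pvScan]
  | cons c rest ih =>
    by_cases hp : pvP c = true
    · rw [List.takeWhile_cons_of_pos hp]
      simp only [pvCutSub]
      have hE : List.isPrefixOf ['e', 'x', 't', 'r', 'a'] (c :: List.takeWhile pvP rest) =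
          List.isPrefixOf ['e', 'x', 't', 'r', 'a'] (c :: rest) := by
        have h0 := pvExtra_takeWhile pvP (by decide) (by decide) (by decide) (by decide)
          (by decide) (c :: rest)
        rwa [List.takeWhile_cons_of_pos hp] at h0
      rw [hE]
      by_cases he : List.isPrefixOf ['e', 'x', 't', 'r', 'a'] (c :: rest) = true
      · simp [pvScan, he]
      · simp only [Bool.not_eq_true] at he
        simp only [he, Bool.false_eq_true, if_false]
        by_cases hq : pvQ c = true
        · rw [List.takeWhile_cons_of_pos hq]
          simp only [List.map_cons, ih]
          have hcont : pvDelims.contains c = false := by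
            simp only [pvP, Bool.and_eq_true, Bool.not_eq_eq_eq_not, Bool.not_true,
              beq_eq_false_iff_ne, ne_eq] at hp
            simp only [pvQ, Bool.and_eq_true, Bool.not_eq_eq_eq_not, Bool.not_true,
              beq_eq_false_iff_ne, ne_eq] at hq
            obtain ⟨⟨⟨⟨⟨g1, g2⟩, g3⟩, g4⟩, g5⟩, g6⟩ := hq
            simp [pvDelims, hp.1, hp.2, g1, g2, g3, g4, g5, g6]
          simp only [pvScan, hcont, he, Bool.or_self, Bool.false_eq_true, if_false]
        · simp only [Bool.not_eq_true] at hq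
          rw [List.takeWhile_cons_of_neg (by simp [hq])]
          have hcont : pvDelims.contains c = true := by
            simp only [pvQ, Bool.and_eq_false_iff, Bool.not_eq_eq_eq_not, Bool.not_false,
              beq_iff_eq] at hq
            rcases hq with ((((h | h) | h) | h) | h) | h <;> simp [pvDelims, h]
          simp only [pvScan, hcont, Bool.true_or, if_true, List.map_nil]
    · simp only [Bool.not_eq_true] at hp
      rw [List.takeWhile_cons_of_neg (by simp [hp])]
      have hcont : pvDelims.contains c = true := by
        simp only [pvP, Bool.and_eq_false_iff, Bool.not_eq_eq_eq_not, Bool.not_false,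
          beq_iff_eq] at hp
        rcases hp with h | h <;> simp [pvDelims, h]
      simp only [pvCutSub, pvScan, hcont, Bool.true_or, if_true, List.takeWhile_nil,
        List.map_nil]

lemma pvString_eq (s : String) :
    String.ofList (PySem.Chars.replace
      (pvSplitFirst (pvSplitFirst (pvSplitFirst (pvSplitFirst (pvSplitFirst (pvSplitFirst
        (pvSplitFirst (pvSplitFirst (pvSplitFirst s.toList ['>']) ['<'])
          ['e', 'x', 't', 'r', 'a']) ['[']) [';']) ['=']) ['(']) [' ']) ['.'])
      ['-'] ['_']) = String.ofList (pvScan s.toList) := by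
  simp only [pvSplitFirst_eq_cutSub, pvReplace_single]
  rw [show pvCutSub ['<'] (pvCutSub ['>'] s.toList) = s.toList.takeWhile pvP from
    pvInner_collapse s.toList]
  rw [pvOuter_collapse, pvMain]

-- ===== VERDICT (by name: the statement is the Claim_ definition above) =====
theorem formatingRequires_spec : Claim_equal_formatingRequires := by
  intro requiresDist _
  unfold Spec_formatingRequires formatingRequires formatingRequires_alt
  cases requiresDist with
  | none => rfl
  | some l => simp only [pvString_eq]
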